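-- pv_equiv track=rewrite | github.com/YongBhin-Kim/pqc-crystals-kyber | lattice-based-crypto/module_rlwe_example.py | parse
-- ===== SOURCE A (Python) =====
-- Q           = 3329
--
-- def parse(coeffs, len, buf, buflen): # mat.vec.coeffs, N, buf[506](xof의출력), 506
--     ctr = pos = 0
--     while ctr < len and pos + 3 <= buflen:
--         val0 = ((buf[pos+0] >> 0) | (buf[pos+1] << 8)) & 0xFFF # 12비트에서 샘플링
--         val1 = ((buf[pos+1] >> 4) | (buf[pos+2] << 4)) & 0xFFF
--         pos += 3
--
--
--         if val0 < Q:
--             coeffs[ctr] = val0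
--             ctr+=1
--         if ctr < len and val1 < Q:
--             coeffs[ctr] = val1
--             ctr+=1
--     return ctr
-- ===== SOURCE B (Python) =====
-- Q = 3329
--
-- def _candidates(buf, buflen):
--     # Phase 1: extract all 12-bit candidate values from the 3-byte chunks,
--     # never reading past the actual buffer.
--     cands = []
--     for pos in range(0, min(buflen, len(buf)) - 2, 3):
--         b0, b1, b2 = buf[pos], buf[pos + 1], buf[pos + 2]
--         cands.append((b0 | (b1 << 8)) & 0xFFF)
--         cands.append(((b1 >> 4) | (b2 << 4)) & 0xFFF)
--     return cands
--
-- def parse(coeffs, len, buf, buflen):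
--     # Phase 2: rejection-sample from the candidate stream, capped at len.
--     ctr = 0
--     for v in _candidates(buf, buflen):
--         if ctr >= len:
--             break
--         if v < Q:
--             coeffs[ctr] = v
--             ctr += 1
--     return ctr
-- ===== Notes on version B (the rewrite author's own statement) =====
-- stated objective: alternative
-- what changed: B separates 12-bit extraction (one pass building the full candidate list over the 3-byte chunks, clamped to the real buffer) from rejection sampling (a second capped filtering pass writing into coeffs), replacing A's single fused while-loop that interleaves both.
-- outside the precondition, e.g. on parse([0], 1, [0, 0, 0], 9): A returns 1, B returns 1; on parse([], 1, [255, 255, 255], 3): A returns 0, B returns 0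
import Mathlib
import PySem

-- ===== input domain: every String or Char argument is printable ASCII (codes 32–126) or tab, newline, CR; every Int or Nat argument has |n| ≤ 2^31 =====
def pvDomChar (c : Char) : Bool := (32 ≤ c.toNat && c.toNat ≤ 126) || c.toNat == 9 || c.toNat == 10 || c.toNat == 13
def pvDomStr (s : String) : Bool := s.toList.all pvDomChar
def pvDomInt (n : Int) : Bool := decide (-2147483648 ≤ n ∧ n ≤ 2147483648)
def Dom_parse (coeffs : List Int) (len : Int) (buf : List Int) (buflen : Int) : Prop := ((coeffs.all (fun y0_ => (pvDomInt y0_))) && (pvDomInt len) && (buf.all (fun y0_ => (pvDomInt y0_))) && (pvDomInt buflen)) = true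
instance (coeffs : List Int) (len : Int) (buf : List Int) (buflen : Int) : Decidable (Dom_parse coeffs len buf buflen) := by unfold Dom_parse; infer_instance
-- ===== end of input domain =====

-- B replaces A's fused sample-while-extracting loop by two phases (extract all 12-bit candidates, then cap-filter them); same cost, different decomposition. A mutates coeffs in place; B performs the identical writes, and the equivalence proved here is about the returned count.


-- ===== PORT A =====
-- the while loop of A; fuel = buflen.toNat bounds the number of iterations (pos advances by 3 each round)
def parseGo (len : Int) (buf : List Int) (buflen : Int) (ctr pos : Int) : Nat → Int
  | 0 => ctr
  | fuel + 1 =>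
    if ctr < len ∧ pos + 3 ≤ buflen then
      let val0 := Int.land (Int.lor (Int.shiftRight (PySem.List.pyGetD buf pos 0) 0) (Int.shiftLeft (PySem.List.pyGetD buf (pos + 1) 0) 8)) 0xFFF
      let val1 := Int.land (Int.lor (Int.shiftRight (PySem.List.pyGetD buf (pos + 1) 0) 4) (Int.shiftLeft (PySem.List.pyGetD buf (pos + 2) 0) 4)) 0xFFF
      let ctr1 := if val0 < 3329 then ctr + 1 else ctr
      let ctr2 := if ctr1 < len ∧ val1 < 3329 then ctr1 + 1 else ctr1
      parseGo len buf buflen ctr2 (pos + 3) fuel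
    else ctr

-- the in-place writes coeffs[ctr] = val never feed back into ctr, so the port tracks ctr only
def parse (coeffs : List Int) (len : Int) (buf : List Int) (buflen : Int) : Int :=
  parseGo len buf buflen 0 0 buflen.toNat

-- ===== PORT B =====
-- the two 12-bit values of the 3-byte chunk at pos
def pvChunkVals (buf : List Int) (pos : Int) : List Int :=
  let b0 := PySem.List.pyGetD buf pos 0
  let b1 := PySem.List.pyGetD buf (pos + 1) 0
  let b2 := PySem.List.pyGetD buf (pos + 2) 0
  [Int.land (Int.lor b0 (Int.shiftLeft b1 8)) 0xFFF,
   Int.land (Int.lor (Int.shiftRight b1 4) (Int.shiftLeft b2 4)) 0xFFF]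

-- Phase 1: extract all candidates, never reading past the actual buffer (min(buflen, len(buf)))
def pvCandidates (buf : List Int) (buflen : Int) : List Int :=
  (PySem.List.pyRange 0 (min buflen (buf.length : Int) - 2) 3).foldl
    (fun acc pos => acc ++ pvChunkVals buf pos) []

def parse_alt (coeffs : List Int) (len : Int) (buf : List Int) (buflen : Int) : Int :=
  -- Phase 2: capped rejection filter (break when ctr >= len)
  (pvCandidates buf buflen).foldl (fun ctr v => if ctr ≥ len then ctr else if v < 3329 then ctr + 1 else ctr) 0

-- ===== PRECONDITION & SPEC =====
-- Pre_ over-approximates A's raise set: outside it Python A can raise IndexError (reading a chunk past buf, or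
-- writing an accepted value past coeffs); A's exact raise condition depends on which candidates get rejected, so a
-- few inputs where A happens to return (stopping or rejecting early) are excluded too — B returns A's value there.
def Pre_parse (coeffs : List Int) (len : Int) (buf : List Int) (buflen : Int) : Prop :=
  buflen < 3 ∨ len ≤ 0 ∨ (buflen ≤ (buf.length : Int) ∧ len ≤ (coeffs.length : Int))
instance (coeffs : List Int) (len : Int) (buf : List Int) (buflen : Int) : Decidable (Pre_parse coeffs len buf buflen) := by unfold Pre_parse; infer_instance
def pvWitness_parse : List Int × Int × List Int × Int := ([0, 0, 0, 0], 4, [1, 2, 3, 4, 5, 6], 6)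

def Spec_parse (coeffs : List Int) (len : Int) (buf : List Int) (buflen : Int) (out : Int) : Prop := out = parse_alt coeffs len buf buflen
instance (coeffs : List Int) (len : Int) (buf : List Int) (buflen : Int) (out : Int) : Decidable (Spec_parse coeffs len buf buflen out) := by unfold Spec_parse; infer_instance

-- ===== CLAIM (what is proved, stated in full; the proofs are below) =====
def Claim_equal_parse : Prop := ∀ (coeffs : List Int) (len : Int) (buf : List Int) (buflen : Int), Dom_parse coeffs len buf buflen → Pre_parse coeffs len buf buflen → Spec_parse coeffs len buf buflen (parse coeffs len buf buflen)

-- ===== LEMMAS AND PROOFS =====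

-- the phase-2 step function of B
def pvStep (len ctr v : Int) : Int := if ctr ≥ len then ctr else if v < 3329 then ctr + 1 else ctr

-- once saturated, the filter pass is the identity
theorem foldl_pvStep_saturated (len : Int) (l : List Int) (ctr : Int) (h : len ≤ ctr) :
    l.foldl (fun c v => pvStep len c v) ctr = ctr := by
  induction l with
  | nil => rfl
  | cons x t ih =>
    rw [List.foldl_cons, show pvStep len ctr x = ctr from by simp [pvStep, ge_iff_le, h]]
    exact ih

-- likewise for the chunk-level fold
theorem foldl_chunks_saturated (len : Int) (buf : List Int) (l : List Int) (ctr : Int) (h : len ≤ ctr) :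
    l.foldl (fun c p => (pvChunkVals buf p).foldl (fun c v => pvStep len c v) c) ctr = ctr := by
  induction l with
  | nil => rfl
  | cons x t ih =>
    rw [List.foldl_cons, foldl_pvStep_saturated len _ _ h]
    exact ih

-- filtering the accumulated candidate list = folding chunk by chunk
theorem foldl_build_filter (len : Int) (buf : List Int) (l : List Int) (acc : List Int) (ctr : Int) :
    (l.foldl (fun a p => a ++ pvChunkVals buf p) acc).foldl (fun c v => pvStep len c v) ctr =
      l.foldl (fun c p => (pvChunkVals buf p).foldl (fun c v => pvStep len c v) c)
        (acc.foldl (fun c v => pvStep len c v) ctr) := by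
  induction l generalizing acc with
  | nil => rfl
  | cons x t ih =>
    rw [List.foldl_cons, List.foldl_cons, ih (acc ++ pvChunkVals buf x), List.foldl_append]

-- one cons step of a step-3 range
theorem pyRange3_cons (a b : Int) (h : a < b) :
    PySem.List.pyRange a b 3 = a :: PySem.List.pyRange (a + 3) b 3 := by
  rw [PySem.List.pyRange_of_pos _ _ (by norm_num : (0:Int) < 3),
      PySem.List.pyRange_of_pos _ _ (by norm_num : (0:Int) < 3), if_pos h]
  have hn : ((b - a + 3 - 1) / 3).toNat
      = (if a + 3 < b then ((b - (a + 3) + 3 - 1) / 3).toNat else 0) + 1 := by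
    by_cases h2 : a + 3 < b
    · rw [if_pos h2]; omega
    · rw [if_neg h2]; omega
  rw [hn, List.range_succ_eq_map, List.map_cons, List.map_map]
  congr 1
  · simp
  · apply List.map_congr_left; intro k _; simp [Function.comp]; push_cast; ring

-- main invariant: A's fused loop from (ctr, pos) equals B's chunk-by-chunk filter over the remaining range
theorem parseGo_eq (len : Int) (buf : List Int) (buflen : Int) :
    ∀ (fuel : Nat) (pos ctr : Int), buflen ≤ pos + 3 * (fuel : Int) + 2 →
      parseGo len buf buflen ctr pos fuel =
        (PySem.List.pyRange pos (buflen - 2) 3).foldl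
          (fun c p => (pvChunkVals buf p).foldl (fun c v => pvStep len c v) c) ctr := by
  intro fuel
  induction fuel with
  | zero =>
    intro pos ctr h
    have : PySem.List.pyRange pos (buflen - 2) 3 = [] := by
      rw [PySem.List.pyRange_of_pos _ _ (by norm_num)]
      simp [if_neg (by omega : ¬ pos < buflen - 2)]
    simp [parseGo, this]
  | succ fuel ih =>
    intro pos ctr h
    by_cases hc : ctr < len ∧ pos + 3 ≤ buflen
    · rw [pyRange3_cons pos (buflen - 2) (by omega), List.foldl_cons,
          ← ih (pos + 3) _ (by push_cast; omega)]
      simp only [parseGo, if_pos hc]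
      congr 1
      simp only [pvChunkVals, List.foldl_cons, List.foldl_nil]
      have h0 : ¬ ctr ≥ len := by omega
      have hsr : ∀ x : Int, Int.shiftRight x 0 = x := fun x => by
        cases x <;> simp [Int.shiftRight]
      simp only [pvStep, if_neg h0, hsr]
      rcases hc with ⟨hc1, _⟩
      by_cases hv0 : Int.land (Int.lor (PySem.List.pyGetD buf pos 0) (Int.shiftLeft (PySem.List.pyGetD buf (pos + 1) 0) 8)) 0xFFF < 3329 <;>
        simp only [hv0, if_pos, if_neg, ite_true, ite_false, if_true, if_false] <;>
        by_cases hs : ctr + 1 ≥ len <;>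
        by_cases hv1 : Int.land (Int.lor (Int.shiftRight (PySem.List.pyGetD buf (pos + 1) 0) 4) (Int.shiftLeft (PySem.List.pyGetD buf (pos + 2) 0) 4)) 0xFFF < 3329 <;>
        simp [hs, hv1] <;> omega
    · simp only [parseGo, if_neg hc]
      push_neg at hc
      by_cases hctr : ctr < len
      · have : PySem.List.pyRange pos (buflen - 2) 3 = [] := by
          rw [PySem.List.pyRange_of_pos _ _ (by norm_num)]
          simp [if_neg (by have := hc hctr; omega : ¬ pos < buflen - 2)]
        simp [this]
      · exact (foldl_chunks_saturated len buf _ ctr (by omega)).symm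

-- ===== VERDICT (by name: the statement is the Claim_ definition above) =====
theorem parse_spec : Claim_equal_parse := by
  unfold Claim_equal_parse
  intro coeffs len buf buflen _ hpre
  show parse coeffs len buf buflen = parse_alt coeffs len buf buflen
  show parseGo len buf buflen 0 0 buflen.toNat =
    ((PySem.List.pyRange 0 (min buflen (buf.length : Int) - 2) 3).foldl
      (fun acc pos => acc ++ pvChunkVals buf pos) []).foldl (fun c v => pvStep len c v) 0
  rw [foldl_build_filter, parseGo_eq len buf buflen buflen.toNat 0 0 (by omega)]
  simp only [List.foldl_nil]
  rcases hpre with h | h | ⟨h1, h2⟩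
  · -- buflen < 3: both ranges are empty
    have e1 : PySem.List.pyRange 0 (buflen - 2) 3 = [] := by
      rw [PySem.List.pyRange_of_pos _ _ (by norm_num)]
      rw [if_neg (by omega : ¬ (0:Int) < buflen - 2)]
      simp
    have e2 : PySem.List.pyRange 0 (min buflen (buf.length : Int) - 2) 3 = [] := by
      rw [PySem.List.pyRange_of_pos _ _ (by norm_num)]
      rw [if_neg (by omega : ¬ (0:Int) < min buflen (buf.length : Int) - 2)]
      simp
    rw [e1, e2]
  · -- len ≤ 0: both filter passes are saturated at 0
    rw [foldl_chunks_saturated len buf _ 0 h, foldl_chunks_saturated len buf _ 0 h]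
  · -- the main case: buflen ≤ len(buf), so the clamp is the identity
    rw [min_eq_left h1]
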